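-- pv_equiv track=rewrite | github.com/koltpython/python-exercises-fall2019 | Section8/connect_four.py | has_antidiagonal_win_condition
-- ===== SOURCE A (Python) =====
-- def has_antidiagonal_win_condition(board, row_no, column_no, player_piece):
--     match_count = 0
--     for i in range(-3, 4):
--         row_index = row_no + i
--         column_index = column_no - i
--         # if piece we are checking is out of bounds
--         if row_index not in range(len(board)) or column_index not in range((len(board[0]))):
--             match_count = 0
--             continue
--
--         piece = board[row_index][column_index]
--         if piece == player_piece:
--             match_count += 1
--         else:
--             match_count = 0
--
--         if match_count == 4:
--             return True
--     return False
-- ===== SOURCE B (Python) =====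
-- def has_antidiagonal_win_condition(board, row_no, column_no, player_piece):
--     n_rows = len(board)
--     n_cols = len(board[0]) if board else 0
--     for start in range(-3, 1):
--         if all(0 <= row_no + i < n_rows
--                and 0 <= column_no - i < n_cols
--                and board[row_no + i][column_no - i] == player_piece
--                for i in range(start, start + 4)):
--             return True
--     return False
-- ===== Notes on version B (the rewrite author's own statement) =====
-- stated objective: alternative
-- what changed: Replaces A's running match counter that resets on mismatch/out-of-bounds with a direct enumeration of the four possible length-4 antidiagonal windows through the cell, each tested with a single all() over its four cells.
import Mathlib
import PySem

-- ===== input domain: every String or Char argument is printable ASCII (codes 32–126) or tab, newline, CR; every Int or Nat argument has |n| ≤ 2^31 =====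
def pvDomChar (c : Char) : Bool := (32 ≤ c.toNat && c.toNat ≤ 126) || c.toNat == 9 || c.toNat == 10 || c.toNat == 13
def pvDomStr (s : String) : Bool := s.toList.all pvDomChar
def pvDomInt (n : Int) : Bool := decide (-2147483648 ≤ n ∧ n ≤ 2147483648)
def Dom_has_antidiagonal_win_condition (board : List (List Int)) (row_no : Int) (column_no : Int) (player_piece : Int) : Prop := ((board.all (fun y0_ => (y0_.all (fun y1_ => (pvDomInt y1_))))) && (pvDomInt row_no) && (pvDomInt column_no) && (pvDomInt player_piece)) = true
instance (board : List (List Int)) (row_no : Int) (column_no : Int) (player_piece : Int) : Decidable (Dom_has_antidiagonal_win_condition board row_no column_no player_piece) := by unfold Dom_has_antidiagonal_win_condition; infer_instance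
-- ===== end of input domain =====

-- B replaces A's resetting run counter with a direct check of the four length-4 antidiagonal
-- windows through the cell (objective: alternative decomposition, same O(1) cost).
-- ===== PORT A =====
def pvLoopA (board : List (List Int)) (row_no : Int) (column_no : Int) (player_piece : Int) : List Int → Int → Bool
  | [], _ => false
  | i :: rest, match_count =>
    let row_index := row_no + i
    let column_index := column_no - i
    -- 'row_index not in range(len(board)) or column_index not in range(len(board[0]))'
    if ¬ (0 ≤ row_index ∧ row_index < (board.length : Int)) ∨
       ¬ (0 ≤ column_index ∧ column_index < ((PySem.List.pyGetD board 0 []).length : Int)) then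
      pvLoopA board row_no column_no player_piece rest 0
    else
      let piece := PySem.List.pyGetD (PySem.List.pyGetD board row_index []) column_index 0
      let match_count' := if piece = player_piece then match_count + 1 else 0
      if match_count' = 4 then true
      else pvLoopA board row_no column_no player_piece rest match_count'

def has_antidiagonal_win_condition (board : List (List Int)) (row_no : Int) (column_no : Int) (player_piece : Int) : Bool :=
  pvLoopA board row_no column_no player_piece (PySem.List.pyRange (-3) 4 1) 0

-- ===== PORT B =====
-- one cell of a window: in bounds and holding the player's piece
def pvCellB (board : List (List Int)) (row_no : Int) (column_no : Int) (player_piece : Int) (n_rows n_cols : Int) (i : Int) : Bool :=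
  decide (0 ≤ row_no + i) && decide (row_no + i < n_rows) &&
  decide (0 ≤ column_no - i) && decide (column_no - i < n_cols) &&
  (PySem.List.pyGetD (PySem.List.pyGetD board (row_no + i) []) (column_no - i) 0 == player_piece)

def has_antidiagonal_win_condition_alt (board : List (List Int)) (row_no : Int) (column_no : Int) (player_piece : Int) : Bool :=
  let n_rows : Int := board.length
  let n_cols : Int := if board.isEmpty then 0 else ((PySem.List.pyGetD board 0 []).length : Int)
  (PySem.List.pyRange (-3) 1 1).any (fun start =>
    (PySem.List.pyRange start (start + 4) 1).all
      (fun i => pvCellB board row_no column_no player_piece n_rows n_cols i))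

-- ===== PRECONDITION & SPEC =====
-- Pre_ excludes inputs on which Python A can raise IndexError: a scanned cell that passes the
-- width check against len(board[0]) but whose own row is shorter (possible only on ragged boards);
-- it is narrower than A's exact domain only on ragged boards where A returns True before reaching
-- such a cell (see claim cites).
def Pre_has_antidiagonal_win_condition (board : List (List Int)) (row_no : Int) (column_no : Int) (player_piece : Int) : Prop :=
  ∀ i ∈ ([-3, -2, -1, 0, 1, 2, 3] : List Int),
    0 ≤ row_no + i → row_no + i < (board.length : Int) →
    0 ≤ column_no - i → column_no - i < ((board.headD []).length : Int) →
    column_no - i < ((board.getD (row_no + i).toNat []).length : Int)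
instance (board : List (List Int)) (row_no : Int) (column_no : Int) (player_piece : Int) : Decidable (Pre_has_antidiagonal_win_condition board row_no column_no player_piece) := by unfold Pre_has_antidiagonal_win_condition; infer_instance

def pvWitness_has_antidiagonal_win_condition : List (List Int) × Int × Int × Int := ([[1, 1], [1, 1]], 0, 1, 1)

def Spec_has_antidiagonal_win_condition (board : List (List Int)) (row_no : Int) (column_no : Int) (player_piece : Int) (out : Bool) : Prop := out = has_antidiagonal_win_condition_alt board row_no column_no player_piece
instance (board : List (List Int)) (row_no : Int) (column_no : Int) (player_piece : Int) (out : Bool) : Decidable (Spec_has_antidiagonal_win_condition board row_no column_no player_piece out) := by unfold Spec_has_antidiagonal_win_condition; infer_instance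

-- ===== CLAIM (what is proved, stated in full; the proofs are below) =====
def Claim_equal_has_antidiagonal_win_condition : Prop := ∀ (board : List (List Int)) (row_no : Int) (column_no : Int) (player_piece : Int), Dom_has_antidiagonal_win_condition board row_no column_no player_piece → Pre_has_antidiagonal_win_condition board row_no column_no player_piece → Spec_has_antidiagonal_win_condition board row_no column_no player_piece (has_antidiagonal_win_condition board row_no column_no player_piece)

-- ===== LEMMAS AND PROOFS =====

-- A's loop step, phrased through B's cell predicate (taken at width len(board[0]), which is what A tests)
theorem pvLoopA_step (board : List (List Int)) (row_no column_no player_piece i mc : Int) (rest : List Int) :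
    pvLoopA board row_no column_no player_piece (i :: rest) mc =
      if pvCellB board row_no column_no player_piece (board.length : Int)
           ((PySem.List.pyGetD board 0 []).length : Int) i then
        (if mc + 1 = 4 then true else pvLoopA board row_no column_no player_piece rest (mc + 1))
      else pvLoopA board row_no column_no player_piece rest 0 := by
  simp only [pvLoopA, pvCellB]
  by_cases h1 : 0 ≤ row_no + i <;>
  by_cases h2 : row_no + i < (board.length : Int) <;>
  by_cases h3 : 0 ≤ column_no - i <;>
  by_cases h4 : column_no - i < ((PySem.List.pyGetD board 0 []).length : Int) <;>
  by_cases h5 : PySem.List.pyGetD (PySem.List.pyGetD board (row_no + i) []) (column_no - i) 0 = player_piece <;>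
    simp [h1, h2, h3, h4, h5] <;> split_ifs <;> first | rfl | omega

theorem pvLoopA_nil (board : List (List Int)) (row_no column_no player_piece mc : Int) :
    pvLoopA board row_no column_no player_piece [] mc = false := rfl

theorem pvNcols_eq (board : List (List Int)) :
    (if board.isEmpty then 0 else ((PySem.List.pyGetD board 0 []).length : Int)) =
      ((PySem.List.pyGetD board 0 []).length : Int) := by
  cases board <;> simp [PySem.List.pyGetD, PySem.List.pyGet?]

-- ===== VERDICT (by name: the statement is the Claim_ definition above) =====
theorem has_antidiagonal_win_condition_spec : Claim_equal_has_antidiagonal_win_condition := by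
  intro board row_no column_no player_piece _ _
  unfold Spec_has_antidiagonal_win_condition
  unfold has_antidiagonal_win_condition has_antidiagonal_win_condition_alt
  rw [pvNcols_eq]
  have hr7 : PySem.List.pyRange (-3) 4 1 = [-3, -2, -1, 0, 1, 2, 3] := by decide
  have hr4 : PySem.List.pyRange (-3) 1 1 = [-3, -2, -1, 0] := by decide
  rw [hr7, hr4]
  have hw1 : PySem.List.pyRange (-3) (-3 + 4) 1 = [-3, -2, -1, 0] := by decide
  have hw2 : PySem.List.pyRange (-2) (-2 + 4) 1 = [-2, -1, 0, 1] := by decide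
  have hw3 : PySem.List.pyRange (-1) (-1 + 4) 1 = [-1, 0, 1, 2] := by decide
  have hw4 : PySem.List.pyRange 0 (0 + 4) 1 = [0, 1, 2, 3] := by decide
  simp only [pvLoopA_step, pvLoopA_nil, List.any_cons, List.any_nil, List.all_cons, List.all_nil,
    hw1, hw2, hw3, hw4]
  generalize pvCellB board row_no column_no player_piece _ _ (-3) = b1
  generalize pvCellB board row_no column_no player_piece _ _ (-2) = b2
  generalize pvCellB board row_no column_no player_piece _ _ (-1) = b3
  generalize pvCellB board row_no column_no player_piece _ _ 0 = b4
  generalize pvCellB board row_no column_no player_piece _ _ 1 = b5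
  generalize pvCellB board row_no column_no player_piece _ _ 2 = b6
  generalize pvCellB board row_no column_no player_piece _ _ 3 = b7
  revert b1 b2 b3 b4 b5 b6 b7
  decide
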